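-- pv_equiv track=rewrite | github.com/ZY-Null/ast_parse | src/ast_parse/public/node_id.py | match_name_list
-- ===== SOURCE A (Python) =====
-- def match_name_list(name1: list[str], name2: list[str]) -> int:
--     # 1. 检查空列表情况
--     if not name1 or not name2:
--         return 0
--
--     # 2. 检查最后一个元素
--     if name1[-1] != name2[-1]:
--         return 0
--
--     match_point = 1
--     l2_pivot = len(name2) - 2
--     for l1_pivot in range((len(name1) - 1), -1, -1):
--         if l2_pivot < 0:
--             break
--         t_value = name1[l1_pivot]
--         l2_cursor = l2_pivot
--         for l2_index in range(l2_cursor, -1, -1):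
--             if name2[l2_index] != t_value:
--                 continue
--             match_point += 1
--             l2_pivot = l2_index - 1
--             break
--     return match_point
-- ===== SOURCE B (Python) =====
-- def _bisect_right(a, x):
--     # verbatim algorithm of bisect.bisect_right (stdlib, not importable here)
--     lo, hi = 0, len(a)
--     while lo < hi:
--         mid = (lo + hi) // 2
--         if x < a[mid]:
--             hi = mid
--         else:
--             lo = mid + 1
--     return lo
--
--
-- def match_name_list(name1: list[str], name2: list[str]) -> int:
--     if not name1 or not name2 or name1[-1] != name2[-1]:
--         return 0
--     # index every value of name2 by its (ascending) occurrence positions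
--     pos = {}
--     for i, v in enumerate(name2):
--         pos.setdefault(v, []).append(i)
--     match_point = 1
--     pivot = len(name2) - 2
--     for v in reversed(name1):
--         if pivot < 0:
--             break
--         idxs = pos.get(v)
--         if idxs:
--             k = _bisect_right(idxs, pivot)
--             if k > 0:
--                 match_point += 1
--                 pivot = idxs[k - 1] - 1
--     return match_point
-- ===== Notes on version B (the rewrite author's own statement) =====
-- stated objective: faster
-- what changed: Replaces A's backward linear rescan of name2 for every element of name1 by a dictionary mapping each value to its sorted occurrence positions, queried with a hand-written bisect_right (stdlib bisect is not importable here) for the greatest position <= the pivot.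
import Mathlib
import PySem

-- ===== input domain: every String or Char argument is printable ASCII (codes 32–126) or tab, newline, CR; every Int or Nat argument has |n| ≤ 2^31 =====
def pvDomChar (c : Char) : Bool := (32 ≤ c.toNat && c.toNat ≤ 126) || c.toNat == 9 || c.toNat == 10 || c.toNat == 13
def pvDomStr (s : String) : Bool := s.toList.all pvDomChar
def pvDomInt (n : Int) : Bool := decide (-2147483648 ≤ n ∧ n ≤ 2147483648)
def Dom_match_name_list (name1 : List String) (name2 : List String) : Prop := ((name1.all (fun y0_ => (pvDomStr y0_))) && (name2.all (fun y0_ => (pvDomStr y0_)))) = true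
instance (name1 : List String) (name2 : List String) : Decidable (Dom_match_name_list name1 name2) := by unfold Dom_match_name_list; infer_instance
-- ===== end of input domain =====

-- B replaces A's backward linear rescans of name2 by a per-value sorted occurrence
-- index queried with binary search (bisect_right): O((n+m) log m) instead of O(n*m).

-- ===== PORT A =====
-- inner 'for l2_index in range(l2_cursor, -1, -1)' loop with continue/break:
-- returns the first index j in the countdown with name2[j] == t (none = no break).
def innerScanA (name2 : List String) (t : String) : List Int → Option Int
  | [] => none
  | j :: rest =>
    match PySem.List.pyGet? name2 j with
    | some v => if v ≠ t then innerScanA name2 t rest else some j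
    | none => none   -- IndexError; unreachable: every scanned j is in range
-- outer 'for l1_pivot in range(len(name1)-1, -1, -1)' loop, state (match_point, l2_pivot)
def outerA (name1 name2 : List String) : List Int → Int → Int → Int
  | [], mp, _ => mp
  | i :: rest, mp, pv =>
    if pv < 0 then mp   -- break
    else
      match PySem.List.pyGet? name1 i with
      | none => mp      -- IndexError; unreachable: every i is in range
      | some t =>
        match innerScanA name2 t (PySem.List.pyRange pv (-1) (-1)) with
        | some j => outerA name1 name2 rest (mp + 1) (j - 1)
        | none => outerA name1 name2 rest mp pv

def match_name_list (name1 : List String) (name2 : List String) : Int :=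
  if name1 = [] ∨ name2 = [] then 0
  else if PySem.List.pyGet? name1 (-1) ≠ PySem.List.pyGet? name2 (-1) then 0
  else outerA name1 name2 (PySem.List.pyRange ((name1.length : Int) - 1) (-1) (-1)) 1
         ((name2.length : Int) - 2)

-- ===== PORT B =====
-- pos = {}; for i, v in enumerate(name2): pos.setdefault(v, []).append(i)
def buildPos (name2 : List String) : PySem.Dict String (List Int) :=
  (PySem.List.enumerate name2 0).foldl
    (fun d p => d.modify p.2 [] (· ++ [p.1])) PySem.Dict.empty
-- Source B's _bisect_right is the verbatim stdlib bisect.bisect_right loop,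
-- which is exactly PySem.List.bisectRight.
-- 'for v in reversed(name1)' loop, state (match_point, pivot)
def loopB (pos : PySem.Dict String (List Int)) : List String → Int → Int → Int
  | [], c, _ => c
  | v :: rest, c, pv =>
    if pv < 0 then c   -- break
    else
      match pos.get? v with
      | some idxs =>
        if idxs ≠ [] then
          let k := PySem.List.bisectRight idxs pv
          if 0 < k then
            loopB pos rest (c + 1) (PySem.List.pyGetD idxs ((k : Int) - 1) 0 - 1)
          else loopB pos rest c pv
        else loopB pos rest c pv
      | none => loopB pos rest c pv

def match_name_list_alt (name1 : List String) (name2 : List String) : Int :=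
  if name1 = [] ∨ name2 = [] then 0
  else if PySem.List.pyGet? name1 (-1) ≠ PySem.List.pyGet? name2 (-1) then 0
  else loopB (buildPos name2) name1.reverse 1 ((name2.length : Int) - 2)

-- ===== PRECONDITION & SPEC =====
def Spec_match_name_list (name1 : List String) (name2 : List String) (out : Int) : Prop := out = match_name_list_alt name1 name2
instance (name1 : List String) (name2 : List String) (out : Int) : Decidable (Spec_match_name_list name1 name2 out) := by unfold Spec_match_name_list; infer_instance

-- ===== CLAIM (what is proved, stated in full; the proofs are below) =====
def Claim_equal_match_name_list : Prop := ∀ (name1 : List String) (name2 : List String), Dom_match_name_list name1 name2 → Spec_match_name_list name1 name2 (match_name_list name1 name2)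

-- ===== LEMMAS AND PROOFS =====

-- the ascending list of occurrence positions of t in name2
def occ (name2 : List String) (t : String) : List Int :=
  (((PySem.List.enumerate name2 0).filter (fun p => p.2 == t)).map (·.1))

-- the greatest occurrence position ≤ pv (what both inner searches compute)
def lastLE (l : List Int) (pv : Int) : Option Int := (l.filter (fun j => j ≤ pv)).getLast?

-- the common abstract loop both outer loops compute
def loopSpec (name2 : List String) : List String → Int → Int → Int
  | [], c, _ => c
  | t :: rest, c, pv =>
    if pv < 0 then c
    else
      match lastLE (occ name2 t) pv with
      | some j => loopSpec name2 rest (c + 1) (j - 1)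
      | none => loopSpec name2 rest c pv

theorem mem_occ (name2 : List String) (t : String) (j : Int) :
    j ∈ occ name2 t ↔ ∃ (k : Nat) (h : k < name2.length), j = (k : Int) ∧ name2[k] = t := by
  unfold occ
  simp only [List.mem_map, List.mem_filter, PySem.List.mem_enumerate_iff]
  constructor
  · rintro ⟨p, ⟨⟨k, h, rfl⟩, ht⟩, rfl⟩
    exact ⟨k, h, by simp, by simpa using ht⟩
  · rintro ⟨k, h, rfl, ht⟩
    exact ⟨(k, name2[k]), ⟨⟨k, h, by simp⟩, by simpa using ht⟩, rfl⟩

theorem occ_pairwise (name2 : List String) (t : String) :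
    (occ name2 t).Pairwise (· < ·) := by
  unfold occ
  rw [List.pairwise_map]
  exact (PySem.List.pairwise_lt_enumerate _ _).sublist List.filter_sublist

theorem occ_ne_nil_iff (name2 : List String) (t : String) :
    occ name2 t ≠ [] ↔ t ∈ name2 := by
  constructor
  · intro h
    obtain ⟨j, hj⟩ := List.exists_mem_of_ne_nil _ h
    obtain ⟨k, hk, -, ht⟩ := (mem_occ name2 t j).mp hj
    exact ht ▸ List.getElem_mem hk
  · intro h hnil
    obtain ⟨k, hk, ht⟩ := List.mem_iff_getElem.mp h
    exact List.ne_nil_of_mem ((mem_occ name2 t k).mpr ⟨k, hk, rfl, ht⟩) hnil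

theorem buildPos_getD (name2 : List String) (t : String) :
    (buildPos name2).getD t [] = occ name2 t := by
  have hswap : buildPos name2
      = ((PySem.List.enumerate name2 0).map Prod.swap).foldl
          (fun d p => d.modify p.1 [] (· ++ [p.2])) PySem.Dict.empty := by
    unfold buildPos
    rw [List.foldl_map]
    rfl
  rw [hswap, PySem.Dict.getD_foldl_modify_append]
  simp [occ, List.filter_map, List.map_map, Function.comp_def]

theorem buildPos_get? (name2 : List String) (t : String) :
    (buildPos name2).get? t = if occ name2 t = [] then none else some (occ name2 t) := by
  have hmem : t ∈ (buildPos name2).keys ↔ t ∈ name2 := by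
    unfold buildPos
    rw [PySem.Dict.keys_foldl_modify_key (PySem.List.enumerate name2 0) (·.2) []
      (fun (_ : PySem.Dict String (List Int)) (p : Int × String) => (· ++ [p.1]))]
    simp [PySem.Set.mem_update, PySem.List.map_snd_enumerate]
  by_cases hocc : occ name2 t = []
  · rw [if_pos hocc, PySem.Dict.get?_eq_none_iff_not_mem_keys, hmem]
    intro ht
    exact (occ_ne_nil_iff name2 t).mpr ht hocc
  · rw [if_neg hocc]
    have hne : (buildPos name2).get? t ≠ none := by
      simp only [ne_eq, PySem.Dict.get?_eq_none_iff_not_mem_keys, hmem]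
      exact not_not_intro ((occ_ne_nil_iff name2 t).mp hocc)
    obtain ⟨x, hx⟩ := Option.ne_none_iff_exists'.mp hne
    have hg := buildPos_getD name2 t
    rw [PySem.Dict.getD_eq_get?_getD, hx] at hg
    simp only [Option.getD_some] at hg
    rw [hx, hg]

-- in a strictly increasing list, an upper-bound member is the last element
theorem getLast?_of_max (l : List Int) (x : Int) (hp : l.Pairwise (· < ·)) (hm : x ∈ l)
    (hb : ∀ y ∈ l, y ≤ x) : l.getLast? = some x := by
  induction l with
  | nil => cases hm
  | cons a rest ih =>
    cases rest with
    | nil =>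
      rw [List.mem_singleton] at hm
      rw [hm]
      rfl
    | cons b r2 =>
      rw [List.getLast?_cons_cons]
      have hpc := List.pairwise_cons.mp hp
      apply ih hpc.2
      · rcases List.mem_cons.mp hm with rfl | hm
        · exact absurd (hb b (by simp)) (not_le.mpr (hpc.1 b (by simp)))
        · exact hm
      · exact fun y hy => hb y (List.mem_cons_of_mem _ hy)

theorem lastLE_hit (name2 : List String) (t : String) (k : Nat) (hk : k < name2.length)
    (ht : name2[k] = t) : lastLE (occ name2 t) (k : Int) = some (k : Int) := by
  unfold lastLE
  apply getLast?_of_max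
  · exact (occ_pairwise name2 t).filter _
  · rw [List.mem_filter]
    exact ⟨(mem_occ name2 t k).mpr ⟨k, hk, rfl, ht⟩, by simp⟩
  · intro y hy
    simpa using (List.mem_filter.mp hy).2

theorem lastLE_miss (name2 : List String) (t : String) (k : Nat) (hk : k < name2.length)
    (ht : ¬ name2[k] = t) :
    lastLE (occ name2 t) (k : Int) = lastLE (occ name2 t) ((k : Int) - 1) := by
  unfold lastLE
  congr 1
  apply List.filter_congr
  intro j hj
  obtain ⟨m, hm, rfl, htm⟩ := (mem_occ name2 t j).mp hj
  have hne : m ≠ k := fun h => ht (h ▸ htm)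
  simp only [decide_eq_decide]
  omega

theorem innerScanA_eq_lastLE (name2 : List String) (t : String) (pv : Int)
    (h0 : 0 ≤ pv) (h1 : pv < (name2.length : Int)) :
    innerScanA name2 t (PySem.List.pyRange pv (-1) (-1)) = lastLE (occ name2 t) pv := by
  obtain ⟨n, rfl⟩ := Int.eq_ofNat_of_zero_le h0
  have hn : n < name2.length := by exact_mod_cast h1
  clear h0 h1
  induction n with
  | zero =>
    rw [PySem.List.pyRange_neg_one_cons (by omega), PySem.List.pyRange_neg_one_eq_nil (by omega)]
    simp only [innerScanA]
    rw [show PySem.List.pyGet? name2 ((0 : Nat) : Int) = some name2[0] by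
      rw [PySem.List.pyGet?_natCast, List.getElem?_eq_getElem hn]]
    by_cases ht : name2[0] = t
    · simp only [ht, ne_eq, not_true_eq_false, if_false]
      exact (lastLE_hit name2 t 0 hn ht).symm
    · simp only [ne_eq, ht, not_false_eq_true, if_true]
      have hocc0 : ∀ a ∈ occ name2 t, ¬ (decide (a ≤ ((0 : Nat) : Int)) = true) := by
        intro j hj
        obtain ⟨m, hm, rfl, htm⟩ := (mem_occ name2 t j).mp hj
        have : m ≠ 0 := fun h => ht (h ▸ htm)
        simp only [decide_eq_true_eq, not_le]
        omega
      have hnil : lastLE (occ name2 t) ((0 : Nat) : Int) = none := by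
        unfold lastLE
        rw [List.filter_eq_nil_iff.mpr hocc0]
        rfl
      rw [hnil]
  | succ m ih =>
    rw [PySem.List.pyRange_neg_one_cons (by omega)]
    simp only [innerScanA]
    rw [show PySem.List.pyGet? name2 (((m + 1 : Nat)) : Int) = some name2[m + 1] by
      rw [PySem.List.pyGet?_natCast, List.getElem?_eq_getElem hn]]
    by_cases ht : name2[m + 1] = t
    · simp only [ht, ne_eq, not_true_eq_false, if_false]
      exact (lastLE_hit name2 t (m + 1) hn ht).symm
    · simp only [ne_eq, ht, not_false_eq_true, if_true]
      rw [show (((m + 1 : Nat) : Int)) - 1 = ((m : Nat) : Int) by push_cast; ring]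
      rw [ih (by omega)]
      rw [lastLE_miss name2 t (m + 1) hn ht]
      congr 1
      push_cast
      ring

-- in a list whose first k elements are ≤ x and the rest are > x, filtering (≤ x) is take k
theorem filter_le_eq_take (l : List Int) (x : Int) :
    ∀ (k : Nat), k ≤ l.length →
    (∀ (j : Nat) (hj : j < l.length), j < k → l[j] ≤ x) →
    (∀ (j : Nat) (hj : j < l.length), k ≤ j → x < l[j]) →
    l.filter (fun a => decide (a ≤ x)) = l.take k := by
  induction l with
  | nil => simp
  | cons a rest ih =>
    intro k hk h1 h2
    cases k with
    | zero =>
      have ha : x < a := h2 0 (by simp) (by omega)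
      rw [List.take_zero, List.filter_cons_of_neg (by simpa using not_le.mpr ha)]
      apply List.filter_eq_nil_iff.mpr
      intro b hb
      obtain ⟨j, hj, rfl⟩ := List.mem_iff_getElem.mp hb
      have hgt := h2 (j + 1) (by simpa using by omega) (by omega)
      simp only [List.getElem_cons_succ] at hgt
      simpa using not_le.mpr hgt
    | succ k' =>
      have ha : a ≤ x := h1 0 (by simp) (by omega)
      rw [List.take_succ_cons, List.filter_cons_of_pos (by simpa using ha)]
      rw [ih k' (by simpa using hk)
        (fun j hj hl => by
          have := h1 (j + 1) (by simpa using by omega) (by omega)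
          simpa using this)
        (fun j hj hl => by
          have := h2 (j + 1) (by simpa using by omega) (by omega)
          simpa using this)]

theorem lastLE_eq_take_bisect (l : List Int) (x : Int) (hp : l.Pairwise (· < ·)) :
    lastLE l x = (l.take (PySem.List.bisectRight l x)).getLast? := by
  obtain ⟨hle, hlt, hgt⟩ := PySem.List.bisectRight_spec l x (hp.imp le_of_lt)
  unfold lastLE
  rw [filter_le_eq_take l x _ hle hlt hgt]

theorem loopB_eq_loopSpec (name2 : List String) (vs : List String) (c pv : Int) :
    loopB (buildPos name2) vs c pv = loopSpec name2 vs c pv := by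
  induction vs generalizing c pv with
  | nil => rfl
  | cons v rest ih =>
    unfold loopB loopSpec
    by_cases hpv : pv < 0
    · rw [if_pos hpv, if_pos hpv]
    · rw [if_neg hpv, if_neg hpv, buildPos_get? name2 v]
      by_cases hocc : occ name2 v = []
      · rw [if_pos hocc]
        dsimp only
        rw [show lastLE (occ name2 v) pv = none by rw [hocc]; rfl]
        exact ih c pv
      · rw [if_neg hocc]
        dsimp only
        rw [if_pos hocc]
        obtain ⟨hle, hlt, hgt⟩ :=
          PySem.List.bisectRight_spec (occ name2 v) pv ((occ_pairwise name2 v).imp le_of_lt)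
        have htake := lastLE_eq_take_bisect (occ name2 v) pv (occ_pairwise name2 v)
        by_cases hk : 0 < PySem.List.bisectRight (occ name2 v) pv
        · rw [if_pos hk]
          have hkl : PySem.List.bisectRight (occ name2 v) pv - 1 < (occ name2 v).length := by
            omega
          have hlast : lastLE (occ name2 v) pv
              = some (occ name2 v)[PySem.List.bisectRight (occ name2 v) pv - 1] := by
            rw [htake, List.getLast?_take, if_neg (by omega), List.getElem?_eq_getElem hkl]
            rfl
          rw [hlast]
          dsimp only
          rw [show PySem.List.pyGetD (occ name2 v)
                ((PySem.List.bisectRight (occ name2 v) pv : Int) - 1) 0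
              = (occ name2 v)[PySem.List.bisectRight (occ name2 v) pv - 1] by
            rw [PySem.List.pyGetD_eq_getElem _ _ (by omega) (by omega)]
            congr 1
            omega]
          exact ih (c + 1) _
        · rw [if_neg hk]
          have hlast : lastLE (occ name2 v) pv = none := by
            rw [htake, show PySem.List.bisectRight (occ name2 v) pv = 0 by omega]
            rfl
          rw [hlast]
          exact ih c pv

theorem outerA_eq_loopSpec (name1 name2 : List String) (is : List Int) (vs : List String)
    (c pv : Int) (hpv : pv < (name2.length : Int))
    (hmap : is.map (PySem.List.pyGet? name1) = vs.map some) :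
    outerA name1 name2 is c pv = loopSpec name2 vs c pv := by
  induction is generalizing vs c pv with
  | nil =>
    obtain rfl : vs = [] := by
      cases vs with
      | nil => rfl
      | cons _ _ => simp at hmap
    rfl
  | cons i is' ih =>
    cases vs with
    | nil => simp at hmap
    | cons v vs' =>
      simp only [List.map_cons, List.cons.injEq] at hmap
      obtain ⟨hv, hrest⟩ := hmap
      unfold outerA loopSpec
      by_cases hpv2 : pv < 0
      · rw [if_pos hpv2, if_pos hpv2]
      · rw [if_neg hpv2, if_neg hpv2, hv]
        dsimp only
        rw [innerScanA_eq_lastLE name2 v pv (by omega) hpv]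
        cases hl : lastLE (occ name2 v) pv with
        | none => exact ih vs' c pv hpv hrest
        | some j =>
          dsimp only
          have hj : j < (name2.length : Int) := by
            unfold lastLE at hl
            have hjm := List.mem_filter.mp (List.mem_of_getLast? hl)
            obtain ⟨m, hm, rfl, -⟩ := (mem_occ name2 v j).mp hjm.1
            exact_mod_cast hm
          exact ih vs' (c + 1) (j - 1) (by omega) hrest

theorem countdown_map (name1 : List String) :
    (PySem.List.pyRange ((name1.length : Int) - 1) (-1) (-1)).map (PySem.List.pyGet? name1)
      = name1.reverse.map some := by
  rw [PySem.List.pyRange_neg_one, List.map_map]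
  apply List.ext_getElem
  · simp
  · intro k h1 h2
    have hk : k < name1.length := by simpa using h2
    simp only [List.getElem_map, List.getElem_range, Function.comp_apply, List.getElem_reverse]
    rw [PySem.List.pyGet?_of_nonneg name1
      (show (0:Int) ≤ (name1.length : Int) - 1 - (k : Int) by omega)]
    have ht : ((name1.length : Int) - 1 - (k : Int)).toNat = name1.length - 1 - k := by omega
    rw [ht, List.getElem?_eq_getElem (by omega)]

-- ===== VERDICT (by name: the statement is the Claim_ definition above) =====
theorem match_name_list_spec : Claim_equal_match_name_list := by
  intro name1 name2 _
  unfold Spec_match_name_list match_name_list match_name_list_alt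
  split
  · rfl
  · split
    · rfl
    · rename_i hne _
      rw [outerA_eq_loopSpec name1 name2 _ name1.reverse _ _ (by
            simp only [not_or] at hne
            have : 0 < name2.length := List.length_pos_iff.mpr hne.2
            omega)
          (countdown_map name1),
        loopB_eq_loopSpec]
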